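-- pv_equiv track=rewrite | github.com/jmkriz/LetterBoxedSolver | main.py | has_all_letters
-- ===== SOURCE A (Python) =====
-- def has_all_letters(letter_box, phrase):
--     letter_counts = {}
--     for side in letter_box:
--         for letter in letter_box[side]:
--             if letter not in letter_counts:
--                 letter_counts[letter] = 1
--             else:
--                 letter_counts[letter] += 1
--     for letter in phrase:
--         if letter in letter_counts:
--             letter_counts[letter] -= 1
--     for letter in letter_counts:
--         if letter_counts[letter] > 0:
--             return False
--     return True
-- ===== SOURCE B (Python) =====
-- def has_all_letters(letter_box, phrase):
--     box = [letter for letters in letter_box.values() for letter in letters]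
--     chars = list(phrase)
--     return all(chars.count(letter) >= box.count(letter) for letter in set(box))
-- ===== Notes on version B (the rewrite author's own statement) =====
-- stated objective: simpler
-- what changed: B replaces A's mutable count dictionary with its decrement loop and final positive-count scan by a single comparison per distinct box letter: it flattens the box into one list and checks count-in-phrase >= count-in-box for each distinct letter, so no dictionary and no mutation survive.
import Mathlib
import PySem

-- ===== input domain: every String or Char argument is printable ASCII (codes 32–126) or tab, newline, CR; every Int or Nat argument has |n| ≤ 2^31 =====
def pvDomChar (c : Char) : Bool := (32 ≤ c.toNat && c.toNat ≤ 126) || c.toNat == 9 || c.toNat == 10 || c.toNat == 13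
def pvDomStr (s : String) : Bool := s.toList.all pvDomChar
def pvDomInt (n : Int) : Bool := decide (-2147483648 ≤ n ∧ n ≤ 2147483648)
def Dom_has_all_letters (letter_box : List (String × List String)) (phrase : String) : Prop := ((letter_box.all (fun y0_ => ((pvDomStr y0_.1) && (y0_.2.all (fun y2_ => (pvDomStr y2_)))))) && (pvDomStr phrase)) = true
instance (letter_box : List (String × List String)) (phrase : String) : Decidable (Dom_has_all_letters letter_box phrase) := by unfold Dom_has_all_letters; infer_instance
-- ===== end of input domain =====

-- B drops A's count dictionary, its decrement loop and its final positive-count scan, and instead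
-- compares phrase counts with box counts once per distinct box letter (objective: simpler).

-- ===== PORT A =====
-- one step of A's first loop: 'if letter not in letter_counts: =1 else: +=1'
def pvCountStep (d : PySem.Dict String Int) (letter : String) : PySem.Dict String Int :=
  if d.contains letter then d.modify letter 0 (· + 1) else d.insert letter 1

-- one step of A's second loop: 'if letter in letter_counts: letter_counts[letter] -= 1'
def pvDecStep (d : PySem.Dict String Int) (c : Char) : PySem.Dict String Int :=
  if d.contains (String.ofList [c]) then d.modify (String.ofList [c]) 0 (· - 1) else d

def has_all_letters (letter_box : List (String × List String)) (phrase : String) : Bool :=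
  -- 'for side in letter_box: for letter in letter_box[side]: …' (dict iteration + lookup)
  let counts : PySem.Dict String Int :=
    letter_box.foldl
      (fun d p => ((PySem.Dict.mk letter_box).getD p.1 []).foldl pvCountStep d)
      PySem.Dict.empty
  -- 'for letter in phrase: …'
  let counts := phrase.toList.foldl pvDecStep counts
  -- 'for letter in letter_counts: if letter_counts[letter] > 0: return False' / 'return True'
  counts.keys.all (fun letter => !(decide (counts.getD letter 0 > 0)))

-- ===== PORT B =====
def has_all_letters_alt (letter_box : List (String × List String)) (phrase : String) : Bool :=
  let box := letter_box.flatMap (fun p => p.2)              -- [l for letters in letter_box.values() for l in letters]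
  let chars := phrase.toList.map (fun c => String.ofList [c])   -- list(phrase)
  (PySem.Set.ofList box).all (fun letter => decide (box.count letter ≤ chars.count letter))

-- ===== PRECONDITION & SPEC =====
-- Pre_ excludes association lists with duplicate keys: a Python dict cannot contain them, so such
-- lists are an ambiguous representation of A's dict argument (first-match lookup vs Python's
-- overwrite) and A's value there is an artefact of the representation, not of A.
def Pre_has_all_letters (letter_box : List (String × List String)) (phrase : String) : Prop :=
  (letter_box.map Prod.fst).Nodup
instance (letter_box : List (String × List String)) (phrase : String) : Decidable (Pre_has_all_letters letter_box phrase) := by unfold Pre_has_all_letters; infer_instance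

def pvWitness_has_all_letters : (List (String × List String)) × String :=
  ([("top", ["a", "b", "c"]), ("left", ["d", "e"])], "bad face")

def Spec_has_all_letters (letter_box : List (String × List String)) (phrase : String) (out : Bool) : Prop := out = has_all_letters_alt letter_box phrase
instance (letter_box : List (String × List String)) (phrase : String) (out : Bool) : Decidable (Spec_has_all_letters letter_box phrase out) := by unfold Spec_has_all_letters; infer_instance

-- ===== CLAIM (what is proved, stated in full; the proofs are below) =====
def Claim_equal_has_all_letters : Prop := ∀ (letter_box : List (String × List String)) (phrase : String), Dom_has_all_letters letter_box phrase → Pre_has_all_letters letter_box phrase → Spec_has_all_letters letter_box phrase (has_all_letters letter_box phrase)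

-- ===== LEMMAS AND PROOFS =====

theorem contains_pvCountStep (d : PySem.Dict String Int) (x v : String) :
    (pvCountStep d x).contains v = (v == x || d.contains v) := by
  unfold pvCountStep
  by_cases hx : d.contains x = true
  · rw [if_pos hx, PySem.Dict.contains_modify]
  · rw [if_neg hx, PySem.Dict.contains_insert]

theorem getD_pvCountStep (d : PySem.Dict String Int) (x v : String) :
    (pvCountStep d x).getD v 0 = if v = x then d.getD v 0 + 1 else d.getD v 0 := by
  unfold pvCountStep
  by_cases hx : d.contains x = true
  · rw [if_pos hx, PySem.Dict.getD_modify]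
    by_cases hv : v = x
    · subst hv; rfl
    · rw [if_neg hv, if_neg hv]
  · rw [if_neg hx, PySem.Dict.getD_insert]
    by_cases hv : v = x
    · subst hv
      rw [if_pos rfl, if_pos rfl,
        PySem.Dict.getD_of_not_contains _ _ (by simpa using hx)]
      omega
    · rw [if_neg hv, if_neg hv]

theorem contains_foldl_pvCountStep (l : List String) (d : PySem.Dict String Int) (v : String) :
    (l.foldl pvCountStep d).contains v = true ↔ (d.contains v = true ∨ v ∈ l) := by
  induction l generalizing d with
  | nil => simp
  | cons x xs ih =>
      rw [List.foldl_cons, ih, contains_pvCountStep]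
      simp only [Bool.or_eq_true, beq_iff_eq, List.mem_cons]
      tauto

theorem getD_foldl_pvCountStep (l : List String) (d : PySem.Dict String Int) (v : String) :
    (l.foldl pvCountStep d).getD v 0 = d.getD v 0 + (l.count v : Int) := by
  induction l generalizing d with
  | nil => simp
  | cons x xs ih =>
      rw [List.foldl_cons, ih, getD_pvCountStep]
      by_cases hv : v = x
      · subst hv
        rw [if_pos rfl, List.count_cons_self]
        push_cast; ring
      · rw [if_neg hv, List.count_cons_of_ne (Ne.symm hv)]

theorem contains_pvDecStep (d : PySem.Dict String Int) (c : Char) (v : String) :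
    (pvDecStep d c).contains v = d.contains v := by
  unfold pvDecStep
  by_cases hc : d.contains (String.ofList [c]) = true
  · rw [if_pos hc, PySem.Dict.contains_modify]
    by_cases hv : v = String.ofList [c]
    · subst hv; simp [hc]
    · simp [hv]
  · rw [if_neg hc]

theorem getD_pvDecStep (d : PySem.Dict String Int) (c : Char) (v : String)
    (hv : d.contains v = true) :
    (pvDecStep d c).getD v 0 = if v = String.ofList [c] then d.getD v 0 - 1 else d.getD v 0 := by
  unfold pvDecStep
  by_cases hc : d.contains (String.ofList [c]) = true
  · rw [if_pos hc, PySem.Dict.getD_modify]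
    by_cases hv' : v = String.ofList [c]
    · subst hv'; rfl
    · rw [if_neg hv', if_neg hv']
  · rw [if_neg hc]
    by_cases hv' : v = String.ofList [c]
    · subst hv'; exact absurd hv (by simpa using hc)
    · rw [if_neg hv']

theorem contains_foldl_pvDecStep (cs : List Char) (d : PySem.Dict String Int) (v : String) :
    (cs.foldl pvDecStep d).contains v = d.contains v := by
  induction cs generalizing d with
  | nil => rfl
  | cons c cs ih => rw [List.foldl_cons, ih, contains_pvDecStep]

theorem getD_foldl_pvDecStep (cs : List Char) (d : PySem.Dict String Int) (v : String)
    (hv : d.contains v = true) :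
    (cs.foldl pvDecStep d).getD v 0
      = d.getD v 0 - ((cs.map (fun c => String.ofList [c])).count v : Int) := by
  induction cs generalizing d with
  | nil => simp
  | cons c cs ih =>
      rw [List.foldl_cons, ih _ (by rw [contains_pvDecStep]; exact hv),
        getD_pvDecStep _ _ _ hv, List.map_cons]
      by_cases hc : v = String.ofList [c]
      · rw [if_pos hc, hc, List.count_cons_self]
        push_cast; ring
      · rw [if_neg hc, List.count_cons_of_ne (Ne.symm hc)]

-- ===== VERDICT (by name: the statement is the Claim_ definition above) =====
theorem has_all_letters_spec : Claim_equal_has_all_letters := by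
  unfold Claim_equal_has_all_letters
  intro lb phrase _ hpre
  unfold Spec_has_all_letters has_all_letters has_all_letters_alt
  -- under Nodup keys, the dict lookup 'letter_box[side]' returns the pair's own value
  have hlook : lb.foldl
        (fun d p => ((PySem.Dict.mk lb).getD p.1 []).foldl pvCountStep d) PySem.Dict.empty
      = (lb.flatMap (fun p => p.2)).foldl pvCountStep PySem.Dict.empty := by
    rw [List.foldl_flatMap]
    apply PySem.List.foldl_congr_mem
    intro acc p hp
    have hnd := hpre
    unfold Pre_has_all_letters at hnd
    rw [PySem.Dict.getD_of_mem_items _ (by simpa using hp) (by simpa using hnd) []]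
  simp only [hlook]
  set box := lb.flatMap (fun p => p.2) with hbox
  set chars := phrase.toList.map (fun c => String.ofList [c]) with hchars
  set d1 := box.foldl pvCountStep PySem.Dict.empty with hd1
  set d2 := phrase.toList.foldl pvDecStep d1 with hd2
  have hmem : ∀ v : String, d2.contains v = true ↔ v ∈ box := by
    intro v
    rw [hd2, contains_foldl_pvDecStep, hd1, contains_foldl_pvCountStep]
    simp
  have hval : ∀ v : String, v ∈ box → d2.getD v 0 = (box.count v : Int) - (chars.count v : Int) := by
    intro v hv
    have hc1 : d1.contains v = true := by
      rw [hd1, contains_foldl_pvCountStep]; exact Or.inr hv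
    rw [hd2, getD_foldl_pvDecStep _ _ _ hc1, hd1, getD_foldl_pvCountStep]
    simp [hchars]
  rw [Bool.eq_iff_iff]
  simp only [List.all_eq_true, Bool.not_eq_eq_eq_not, Bool.not_true, decide_eq_false_iff_not,
    not_lt]
  constructor
  · intro h v hv
    have hv' : v ∈ box := (PySem.Set.mem_ofList box v).mp hv
    have := h v ((PySem.Dict.contains_iff_mem_keys d2 v).mp ((hmem v).mpr hv'))
    rw [hval v hv'] at this
    simp only [decide_eq_true_eq]
    omega
  · intro h v hv
    have hv' : v ∈ box := (hmem v).mp ((PySem.Dict.contains_iff_mem_keys d2 v).mpr hv)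
    have := h v ((PySem.Set.mem_ofList box v).mpr hv')
    simp only [decide_eq_true_eq] at this
    rw [hval v hv']
    omega
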